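-- pv_equiv track=rewrite | github.com/PunithaYaku/Chess-Puzzel-Gen | generate_puzzles.py | repair_fen
-- ===== SOURCE A (Python) =====
-- def repair_fen(fen):
--     parts = fen.split(" ")
--     pos = parts[0]
--     rows = pos.split("/")
--
--     # Force exactly 8 rows
--     if len(rows) > 8:
--         rows = rows[:8]
--     elif len(rows) < 8:
--         rows.extend(['8'] * (8 - len(rows)))
--
--     new_rows = []
--     for row in rows:
--         squares = []
--         for char in row:
--             if char.isdigit():
--                 squares.extend(['1'] * int(char))
--             else:
--                 squares.append(char)
--
--         if len(squares) > 8: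
--             squares = squares[:8]
--         elif len(squares) < 8:
--             squares.extend(['1'] * (8 - len(squares)))
--
--         new_row = ""
--         count = 0
--         for s in squares:
--             if s == '1':
--                 count += 1
--             else:
--                 if count > 0:
--                     new_row += str(count)
--                     count = 0
--                 new_row += s
--         if count > 0:
--             new_row += str(count)
--         new_rows.append(new_row)
--
--     new_pos = "/".join(new_rows)
--     turn = parts[1] if len(parts) > 1 and parts[1] in ['w', 'b'] else 'w'
--     castling = parts[2] if len(parts) > 2 else '-'
--     ep = parts[3] if len(parts) > 3 else '-'
--     hm = '0'
--     fm = '1'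
--
--     return f"{new_pos} {turn} {castling} {ep} {hm} {fm}"
-- ===== SOURCE B (Python) =====
-- def _get(parts, i, default):
--     return parts[i] if i < len(parts) else default
--
--
-- def _row(row):
--     # one pass over the raw characters: no expanded squares list is ever built
--     out = []
--     used = 0      # squares accounted for so far (pieces + empties), capped at 8
--     pending = 0   # length of the current run of empty squares
--     for ch in row:
--         if ch.isdigit():
--             take = min(int(ch), 8 - used)
--             used += take
--             pending += take
--         elif used < 8:
--             if pending:
--                 out.append(str(pending))
--                 pending = 0
--             out.append(ch)
--             used += 1
--     if used < 8:
--         pending += 8 - used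
--     if pending:
--         out.append(str(pending))
--     return "".join(out)
--
--
-- def repair_fen(fen):
--     parts = fen.split(" ")
--     rows = (parts[0].split("/") + ['8'] * 8)[:8]
--     t = _get(parts, 1, '')
--     return " ".join(["/".join(_row(r) for r in rows),
--                      t if t in ('w', 'b') else 'w',
--                      _get(parts, 2, '-'),
--                      _get(parts, 3, '-'),
--                      '0', '1'])
-- ===== Notes on version B (the rewrite author's own statement) =====
-- stated objective: alternative
-- what changed: B repairs each row in a single pass over its raw characters with a (used, pending-empties) counter state and min-capped digit consumption, never materializing A's expanded 8-square list nor A's separate truncate/pad and recompaction passes; header fields come from one padded-lookup helper and a final join.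
import Mathlib
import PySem

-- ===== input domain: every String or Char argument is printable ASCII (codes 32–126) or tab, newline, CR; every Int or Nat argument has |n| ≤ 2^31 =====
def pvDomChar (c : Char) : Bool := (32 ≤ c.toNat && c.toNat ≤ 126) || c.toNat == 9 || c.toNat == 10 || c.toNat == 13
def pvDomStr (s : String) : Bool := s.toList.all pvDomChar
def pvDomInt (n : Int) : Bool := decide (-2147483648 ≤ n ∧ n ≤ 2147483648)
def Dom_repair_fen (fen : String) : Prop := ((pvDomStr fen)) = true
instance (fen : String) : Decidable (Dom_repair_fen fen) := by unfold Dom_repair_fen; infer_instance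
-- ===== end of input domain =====

-- B repairs each row in one pass over the raw characters with a (used, pending) counter state,
-- never building A's expanded square list or its separate truncate/pad/recompact passes (alternative).

-- ===== PORT A =====

-- for char in row: digits expand to '1'*int(char), others append  (int(char) is defined: isdigit guard)
def pvSquaresA (row : List Char) : List Char :=
  row.foldl (fun squares c =>
    if PySem.Chars.isdigit c then
      squares ++ PySem.List.pyRepeat ['1'] ((PySem.Int.ofChars? [c]).getD 0)
    else squares ++ [c]) []

-- truncate to 8 / pad with x to 8
def pvFixA {α : Type} (l : List α) (x : α) : List α :=
  if l.length > 8 then PySem.List.slice l none (some 8)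
  else l ++ PySem.List.pyRepeat [x] (8 - (l.length : Int))

-- the running-counter compaction loop body: state (new_row, count)
def pvStepA (st : List Char × Int) (s : Char) : List Char × Int :=
  if s = '1' then (st.1, st.2 + 1)
  else (st.1 ++ (if st.2 > 0 then PySem.Int.toChars st.2 else []) ++ [s], 0)

-- the trailing 'if count > 0: new_row += str(count)' after the loop
def pvFinA (r : List Char × Int) : List Char :=
  if r.2 > 0 then r.1 ++ PySem.Int.toChars r.2 else r.1

def pvRowA (row : List Char) : List Char :=
  pvFinA ((pvFixA (pvSquaresA row) '1').foldl pvStepA ([], 0))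

def repair_fen (fen : String) : String :=
  let parts := PySem.Chars.splitOn fen.toList [' ']
  let pos := (PySem.List.pyGet? parts 0).getD []   -- split never yields []; the default is unreachable
  let rows := pvFixA (PySem.Chars.splitOn pos ['/']) ['8']
  let new_rows := rows.foldl (fun acc row => acc ++ [pvRowA row]) []
  let new_pos := PySem.Chars.join ['/'] new_rows
  let p1 := (PySem.List.pyGet? parts 1).getD []
  let turn := if parts.length > 1 ∧ (p1 = ['w'] ∨ p1 = ['b']) then p1 else ['w']
  let castling := if parts.length > 2 then (PySem.List.pyGet? parts 2).getD [] else ['-']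
  let ep := if parts.length > 3 then (PySem.List.pyGet? parts 3).getD [] else ['-']
  String.ofList (new_pos ++ [' '] ++ turn ++ [' '] ++ castling ++ [' '] ++ ep ++ [' ', '0', ' ', '1'])

-- ===== PORT B =====

-- _get(parts, i, default) = parts[i] if i < len(parts) else default
def pvGetD (parts : List (List Char)) (i : Int) (d : List Char) : List Char :=
  if i < (parts.length : Int) then (PySem.List.pyGet? parts i).getD d else d

-- the single-pass loop body of _row: state (out, used, pending)
def pvStepB (st : List (List Char) × Int × Int) (ch : Char) : List (List Char) × Int × Int :=
  if PySem.Chars.isdigit ch then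
    let tk := min ((PySem.Int.ofChars? [ch]).getD 0) (8 - st.2.1)
    (st.1, st.2.1 + tk, st.2.2 + tk)
  else if st.2.1 < 8 then
    ((if st.2.2 > 0 then st.1 ++ [PySem.Int.toChars st.2.2] else st.1) ++ [[ch]], st.2.1 + 1, 0)
  else st

-- the tail of _row after the loop: pad the final empty run, flush it, join
def pvFinB (r : List (List Char) × Int × Int) : List Char :=
  let pending := if r.2.1 < 8 then r.2.2 + (8 - r.2.1) else r.2.2
  PySem.Chars.join [] (if pending > 0 then r.1 ++ [PySem.Int.toChars pending] else r.1)

def pvRowB (row : List Char) : List Char :=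
  pvFinB (row.foldl pvStepB ([], 0, 0))

def repair_fen_alt (fen : String) : String :=
  let parts := PySem.Chars.splitOn fen.toList [' ']
  let rows := PySem.List.slice
    (PySem.Chars.splitOn ((PySem.List.pyGet? parts 0).getD []) ['/'] ++ PySem.List.pyRepeat [['8']] 8)
    none (some 8)
  let t := pvGetD parts 1 []
  String.ofList (PySem.Chars.join [' ']
    [PySem.Chars.join ['/'] (rows.map pvRowB),
     if t = ['w'] ∨ t = ['b'] then t else ['w'],
     pvGetD parts 2 ['-'], pvGetD parts 3 ['-'], ['0'], ['1']])

-- ===== PRECONDITION & SPEC =====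
def Spec_repair_fen (fen : String) (out : String) : Prop := out = repair_fen_alt fen
instance (fen : String) (out : String) : Decidable (Spec_repair_fen fen out) := by unfold Spec_repair_fen; infer_instance

-- ===== CLAIM (what is proved, stated in full; the proofs are below) =====
def Claim_equal_repair_fen : Prop := ∀ (fen : String), Dom_repair_fen fen → Spec_repair_fen fen (repair_fen fen)

-- ===== LEMMAS AND PROOFS =====

-- int(c) for a digit character c
lemma pv_digit (c : Char) (h : PySem.Chars.isdigit c = true) :
    PySem.Int.ofChars? [c] = some ((c.toNat : Int) - 48) := by
  simp only [PySem.Chars.isdigit, Bool.and_eq_true, decide_eq_true_eq, Char.le_def] at h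
  have hv : 48 ≤ c.val.toNat ∧ c.val.toNat ≤ 57 :=
    ⟨UInt32.le_iff_toNat_le.mp h.1, UInt32.le_iff_toNat_le.mp h.2⟩
  have hc : ∀ d : Char, c.val.toNat = d.val.toNat → c = d := fun d hd =>
    Char.ext (UInt32.toNat_inj.mp hd)
  rcases (by omega : c.val.toNat = 48 ∨ c.val.toNat = 49 ∨ c.val.toNat = 50 ∨ c.val.toNat = 51 ∨
      c.val.toNat = 52 ∨ c.val.toNat = 53 ∨ c.val.toNat = 54 ∨ c.val.toNat = 55 ∨
      c.val.toNat = 56 ∨ c.val.toNat = 57) with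
    h|h|h|h|h|h|h|h|h|h <;>
  · first
    | (rw [hc '0' (by rw [h]; decide)]; decide) | (rw [hc '1' (by rw [h]; decide)]; decide)
    | (rw [hc '2' (by rw [h]; decide)]; decide) | (rw [hc '3' (by rw [h]; decide)]; decide)
    | (rw [hc '4' (by rw [h]; decide)]; decide) | (rw [hc '5' (by rw [h]; decide)]; decide)
    | (rw [hc '6' (by rw [h]; decide)]; decide) | (rw [hc '7' (by rw [h]; decide)]; decide)
    | (rw [hc '8' (by rw [h]; decide)]; decide) | (rw [hc '9' (by rw [h]; decide)]; decide)

lemma pv_digit_nonneg (c : Char) (h : PySem.Chars.isdigit c = true) :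
    0 ≤ (c.toNat : Int) - 48 := by
  simp only [PySem.Chars.isdigit, Bool.and_eq_true, decide_eq_true_eq, Char.le_def] at h
  have : 48 ≤ c.val.toNat := UInt32.le_iff_toNat_le.mp h.1
  simp only [Char.toNat]
  omega

-- canonical run-length encoding of a row of squares, with a pending run of empties
def pvC : List Char → Nat → List Char
  | [], p => if p > 0 then PySem.Int.toChars p else []
  | c :: t, p =>
    if c = '1' then pvC t (p + 1)
    else (if p > 0 then PySem.Int.toChars p else []) ++ c :: pvC t 0

lemma pvC_one (t : List Char) (p : Nat) : pvC ('1' :: t) p = pvC t (p + 1) := by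
  simp [pvC]

lemma pvC_piece (c : Char) (t : List Char) (p : Nat) (h : c ≠ '1') :
    pvC (c :: t) p = (if p > 0 then PySem.Int.toChars p else []) ++ c :: pvC t 0 := by
  simp [pvC, h]

-- the per-char expansion A performs, as a function of one character
def pvF (c : Char) : List Char :=
  if PySem.Chars.isdigit c then
    List.replicate ((PySem.Int.ofChars? [c]).getD 0).toNat '1'
  else [c]

lemma pv_join_nil_flatten (parts : List (List Char)) :
    PySem.Chars.join [] parts = parts.flatten := by
  induction parts with
  | nil => simp [PySem.Chars.join_nil]
  | cons p rest ih =>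
    cases rest with
    | nil => simp [PySem.Chars.join_singleton]
    | cons q r =>
      rw [PySem.Chars.join_cons_cons, ih]
      simp

-- A's branchy truncate/pad equals pad-then-take
lemma pv_fix_eq_take {α : Type} (l : List α) (x : α) :
    pvFixA l x = (l ++ List.replicate 8 x).take 8 := by
  rw [pvFixA, PySem.List.pyRepeat_singleton,
      PySem.List.slice_to _ (by omega), List.take_append, List.take_replicate]
  split_ifs with h
  · rw [show min (8 - l.length) 8 = 0 by omega]
    simp
  · rw [List.take_of_length_le (by omega)]
    congr 2
    omega

-- A's expansion loop equals flatMap pvF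
lemma pv_squaresA_eq (row : List Char) : pvSquaresA row = row.flatMap pvF := by
  unfold pvSquaresA
  have hfun : (fun (squares : List Char) (c : Char) =>
      if PySem.Chars.isdigit c then
        squares ++ PySem.List.pyRepeat ['1'] ((PySem.Int.ofChars? [c]).getD 0)
      else squares ++ [c])
    = fun (squares : List Char) (c : Char) => squares ++ pvF c := by
    funext a c
    unfold pvF
    split_ifs <;> simp [PySem.List.pyRepeat_singleton]
  rw [hfun, PySem.List.foldl_append_eq_flatMap, List.nil_append]

-- A's counter loop with its finalizer equals pvC
lemma pv_A_fold (l : List Char) : ∀ (acc : List Char) (p : Nat),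
    pvFinA (l.foldl pvStepA (acc, (p : Int))) = acc ++ pvC l p := by
  induction l with
  | nil =>
    intro acc p
    simp only [List.foldl_nil, pvFinA, pvC]
    by_cases hp : 0 < p
    · rw [if_pos (by exact_mod_cast hp), if_pos hp]
    · rw [if_neg (by exact_mod_cast hp), if_neg (by omega), List.append_nil]
  | cons c t ih =>
    intro acc p
    by_cases h1 : c = '1'
    · subst h1
      have hstep : pvStepA (acc, (p : Int)) '1' = (acc, ((p + 1 : Nat) : Int)) := by
        simp only [pvStepA, if_pos]
        push_cast
        rfl
      rw [List.foldl_cons, hstep, ih, pvC_one]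
    · have hstep : pvStepA (acc, (p : Int)) c
          = (acc ++ (if p > 0 then PySem.Int.toChars (p : Int) else []) ++ [c], ((0 : Nat) : Int)) := by
        simp only [pvStepA, if_neg h1]
        congr 2
        by_cases hp : 0 < p
        · rw [if_pos (by exact_mod_cast hp), if_pos hp]
        · rw [if_neg (by exact_mod_cast hp), if_neg (by omega)]
      rw [List.foldl_cons, hstep, ih, pvC_piece c t p h1]
      simp

lemma pvC_replicate_append (m : Nat) : ∀ (L : List Char) (p : Nat),
    pvC (List.replicate m '1' ++ L) p = pvC L (p + m) := by
  induction m with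
  | zero => intro L p; simp
  | succ k ih =>
    intro L p
    rw [List.replicate_succ, List.cons_append, pvC_one, ih]
    congr 1
    omega

lemma pvC_replicate (k p : Nat) :
    pvC (List.replicate k '1') p = if 0 < p + k then PySem.Int.toChars ((p + k : Nat) : Int) else [] := by
  rw [← List.append_nil (List.replicate k '1'), pvC_replicate_append]
  simp only [pvC]

-- the heart: B's single pass equals pvC of the expanded, truncated, padded squares
lemma pv_B_inv (row : List Char) : ∀ (out : List (List Char)) (u p : Nat), u ≤ 8 →
    pvFinB (row.foldl pvStepB (out, (u : Int), (p : Int)))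
      = out.flatten ++ pvC ((row.flatMap pvF ++ List.replicate 8 '1').take (8 - u)) p := by
  induction row with
  | nil =>
    intro out u p hu
    simp only [List.foldl_nil, List.flatMap_nil, List.nil_append, List.take_replicate,
      pvFinB, pv_join_nil_flatten]
    rw [show min (8 - u) 8 = 8 - u by omega, pvC_replicate]
    by_cases h8 : u < 8
    · rw [if_pos (show (u : Int) < 8 by exact_mod_cast h8)]
      have hval : (p : Int) + (8 - (u : Int)) = ((p + (8 - u) : Nat) : Int) := by push_cast; omega
      rw [hval,
          if_pos (show (0 : Int) < ((p + (8 - u) : Nat) : Int) by exact_mod_cast (show 0 < p + (8 - u) by omega)),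
          if_pos (show 0 < p + (8 - u) by omega)]
      simp
    · have hu8 : u = 8 := by omega
      subst hu8
      rw [if_neg (show ¬ (((8 : Nat) : Int) < 8) by norm_num)]
      simp only [Nat.sub_self, Nat.add_zero]
      by_cases hp : 0 < p
      · rw [if_pos (show (0 : Int) < (p : Int) by exact_mod_cast hp), if_pos hp]
        simp
      · rw [if_neg (show ¬ ((0 : Int) < (p : Int)) by exact_mod_cast hp), if_neg hp]
        simp
  | cons c t ih =>
    intro out u p hu
    by_cases hd : PySem.Chars.isdigit c = true
    · -- digit: consume min(int(c), 8-used) empties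
      have hv := pv_digit c hd
      have hv0 := pv_digit_nonneg c hd
      set dv : Nat := ((c.toNat : Int) - 48).toNat with hdv
      have hvdv : (c.toNat : Int) - 48 = (dv : Int) := by omega
      have hstep : pvStepB (out, (u : Int), (p : Int)) c
          = (out, ((u + min dv (8 - u) : Nat) : Int), ((p + min dv (8 - u) : Nat) : Int)) := by
        simp only [pvStepB, if_pos hd, hv, Option.getD_some]
        have hm : min ((c.toNat : Int) - 48) (8 - (u : Int)) = ((min dv (8 - u) : Nat) : Int) := by
          push_cast
          omega
        rw [hm]
        exact congrArg₂ Prod.mk rfl (congrArg₂ Prod.mk (by push_cast; ring) (by push_cast; ring))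
      rw [List.foldl_cons, hstep, ih out _ _ (by omega)]
      congr 1
      have hfc : pvF c = List.replicate dv '1' := by
        unfold pvF
        rw [if_pos hd, hv, Option.getD_some, hvdv, Int.toNat_natCast]
      have hsplit : ((c :: t).flatMap pvF ++ List.replicate 8 '1').take (8 - u)
          = List.replicate (min dv (8 - u)) '1'
            ++ (t.flatMap pvF ++ List.replicate 8 '1').take (8 - (u + min dv (8 - u))) := by
        rw [List.flatMap_cons, hfc, List.append_assoc, List.take_append, List.take_replicate,
            List.length_replicate,
            show min (8 - u) dv = min dv (8 - u) by omega,
            show 8 - u - dv = 8 - (u + min dv (8 - u)) by omega]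
      rw [hsplit, pvC_replicate_append]
    · -- piece character
      by_cases h8 : u < 8
      · have hfc : pvF c = [c] := by unfold pvF; rw [if_neg hd]
        have hc1 : c ≠ '1' := by
          intro hc
          subst hc
          exact hd (by decide)
        have hstep : pvStepB (out, (u : Int), (p : Int)) c
            = ((if (p : Int) > 0 then out ++ [PySem.Int.toChars (p : Int)] else out) ++ [[c]],
               ((u + 1 : Nat) : Int), ((0 : Nat) : Int)) := by
          simp only [pvStepB, if_neg hd, if_pos (show (u : Int) < 8 by exact_mod_cast h8)]
          exact congrArg₂ Prod.mk rfl (congrArg₂ Prod.mk (by push_cast; ring) (by simp))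
        rw [List.foldl_cons, hstep, ih _ _ _ (by omega)]
        have hsplit : ((c :: t).flatMap pvF ++ List.replicate 8 '1').take (8 - u)
            = c :: (t.flatMap pvF ++ List.replicate 8 '1').take (8 - (u + 1)) := by
          rw [List.flatMap_cons, hfc, List.cons_append, List.cons_append,
              show 8 - u = (8 - (u + 1)) + 1 by omega, List.take_succ_cons, List.nil_append]
        rw [hsplit, pvC_piece c _ p hc1]
        by_cases hp : 0 < p
        · rw [if_pos (show (0 : Int) < (p : Int) by exact_mod_cast hp), if_pos hp]
          simp
        · rw [if_neg (show ¬ ((0 : Int) < (p : Int)) by exact_mod_cast hp), if_neg hp]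
          simp
      · -- used = 8: the state is unchanged
        have hu8 : u = 8 := by omega
        subst hu8
        have hstep : pvStepB (out, ((8 : Nat) : Int), (p : Int)) c = (out, ((8 : Nat) : Int), (p : Int)) := by
          simp only [pvStepB, if_neg hd]
          rw [if_neg (show ¬ (((8 : Nat) : Int) < 8) by norm_num)]
        rw [List.foldl_cons, hstep, ih out 8 p (by omega)]
        simp
lemma pv_row_eq (row : List Char) : pvRowA row = pvRowB row := by
  unfold pvRowA pvRowB
  rw [pv_squaresA_eq, pv_fix_eq_take]
  have hA := pv_A_fold ((row.flatMap pvF ++ List.replicate 8 '1').take 8) [] 0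
  simp only [Nat.cast_zero, List.nil_append] at hA
  rw [hA]
  have hB := pv_B_inv row [] 0 0 (by omega)
  simp only [Nat.cast_zero, List.flatten_nil, List.nil_append, Nat.sub_zero] at hB
  rw [hB]

-- ===== VERDICT (by name: the statement is the Claim_ definition above) =====
theorem repair_fen_spec : Claim_equal_repair_fen := by
  intro fen _
  unfold Spec_repair_fen
  show repair_fen fen = repair_fen_alt fen
  simp only [repair_fen, repair_fen_alt]
  have hrows : PySem.List.slice
      (PySem.Chars.splitOn ((PySem.List.pyGet? (PySem.Chars.splitOn fen.toList [' ']) 0).getD []) ['/']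
        ++ PySem.List.pyRepeat [['8']] 8) none (some 8)
      = pvFixA (PySem.Chars.splitOn ((PySem.List.pyGet? (PySem.Chars.splitOn fen.toList [' ']) 0).getD []) ['/']) ['8'] := by
    rw [pv_fix_eq_take, PySem.List.pyRepeat_singleton, PySem.List.slice_to _ (by omega)]
    rfl
  rw [hrows, PySem.List.foldl_append_singleton_eq_map, List.nil_append,
      show pvRowA = pvRowB from funext pv_row_eq]
  have hturn : (if (PySem.Chars.splitOn fen.toList [' ']).length > 1 ∧
        ((PySem.List.pyGet? (PySem.Chars.splitOn fen.toList [' ']) 1).getD [] = ['w'] ∨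
         (PySem.List.pyGet? (PySem.Chars.splitOn fen.toList [' ']) 1).getD [] = ['b'])
      then (PySem.List.pyGet? (PySem.Chars.splitOn fen.toList [' ']) 1).getD [] else ['w'])
      = (if pvGetD (PySem.Chars.splitOn fen.toList [' ']) 1 [] = ['w'] ∨
           pvGetD (PySem.Chars.splitOn fen.toList [' ']) 1 [] = ['b']
         then pvGetD (PySem.Chars.splitOn fen.toList [' ']) 1 [] else ['w']) := by
    by_cases hl : 1 < (PySem.Chars.splitOn fen.toList [' ']).length
    · have ht : pvGetD (PySem.Chars.splitOn fen.toList [' ']) 1 []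
          = (PySem.List.pyGet? (PySem.Chars.splitOn fen.toList [' ']) 1).getD [] := by
        rw [pvGetD, if_pos (by exact_mod_cast hl)]
      rw [ht]
      simp [hl]
    · have ht : pvGetD (PySem.Chars.splitOn fen.toList [' ']) 1 [] = [] := by
        rw [pvGetD, if_neg (by omega)]
      rw [ht]
      simp [hl]
  have hfield : ∀ (n : Nat), (if (PySem.Chars.splitOn fen.toList [' ']).length > n
        then (PySem.List.pyGet? (PySem.Chars.splitOn fen.toList [' ']) (n : Int)).getD [] else ['-'])
      = pvGetD (PySem.Chars.splitOn fen.toList [' ']) (n : Int) ['-'] := by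
    intro n
    rw [pvGetD]
    by_cases hl : n < (PySem.Chars.splitOn fen.toList [' ']).length
    · rw [if_pos hl, if_pos (by exact_mod_cast hl), PySem.List.pyGet?_natCast,
          List.getElem?_eq_getElem hl]
      rfl
    · rw [if_neg hl, if_neg (by omega)]
  have h2 := hfield 2
  have h3 := hfield 3
  push_cast at h2 h3
  rw [hturn, h2, h3]
  have hjoin : ∀ (a b c d : List Char), PySem.Chars.join [' '] [a, b, c, d, ['0'], ['1']]
      = a ++ [' '] ++ b ++ [' '] ++ c ++ [' '] ++ d ++ [' ', '0', ' ', '1'] := by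
    intro a b c d
    simp only [PySem.Chars.join_cons_cons, PySem.Chars.join_singleton]
    simp [List.append_assoc]
  rw [hjoin]
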